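-- pv_equiv track=rewrite | github.com/seanmullane/TREC_2018_UVA | code/python/relation_graph_exclusivity_clean.py | getPathsAB
-- ===== SOURCE A (Python) =====
-- def getPathsAB(L, A, B):
--     '''
--     returns subset of L that are all paths directly from CUI A to CUI B in pathlist L
--     '''
--     paths = set()
--     for path in L: # path is a tuple of tuples(paths)
--         newpath = []
--         start = False
--         end = False
--         for leg in path: # leg is a tuple of relations
--             if (leg[0] == A): # leg[0] should be first CUI in tuple
--                 start = True
--             if (leg[2] == B): # leg[2] should be first CUI in tuple
--                 # last leg of the path subset we want, so set end flag
--                 end = True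
--             if (start):
--                 newpath.append(leg)
--             if (end):
--                 newpath = tuple(newpath)
--                 paths.add(newpath)
--                 break
--     return paths
-- ===== SOURCE B (Python) =====
-- def getPathsAB(L, A, B):
--     '''
--     returns subset of L that are all paths directly from CUI A to CUI B in pathlist L
--     '''
--     paths = set()
--     for path in L:
--         j = next((i for i, leg in enumerate(path) if leg[2] == B), None)
--         if j is None:
--             continue
--         s = next((i for i, leg in enumerate(path[:j + 1]) if leg[0] == A), None)
--         if s is not None:
--             paths.add(tuple(path[s:j + 1]))
--     return paths
-- ===== Notes on version B (the rewrite author's own statement) =====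
-- stated objective: simpler
-- what changed: B replaces A's per-leg start/end flag accumulation with explicit boundary indices: it finds the first leg whose target is B, the first leg whose source is A within that prefix, and slices the path between them.
-- intended difference: On paths whose first leg targeting B has no leg sourced at A at or before it, A adds the empty tuple () to its result (its end flag fires before start ever set) while B adds nothing; an empty tuple is not a path from A to B, so omitting it is the intended value. — e.g. on getPathsAB([[["x", "r", "b"]]], "a", "b"): A returns [[]], B returns []
import Mathlib
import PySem

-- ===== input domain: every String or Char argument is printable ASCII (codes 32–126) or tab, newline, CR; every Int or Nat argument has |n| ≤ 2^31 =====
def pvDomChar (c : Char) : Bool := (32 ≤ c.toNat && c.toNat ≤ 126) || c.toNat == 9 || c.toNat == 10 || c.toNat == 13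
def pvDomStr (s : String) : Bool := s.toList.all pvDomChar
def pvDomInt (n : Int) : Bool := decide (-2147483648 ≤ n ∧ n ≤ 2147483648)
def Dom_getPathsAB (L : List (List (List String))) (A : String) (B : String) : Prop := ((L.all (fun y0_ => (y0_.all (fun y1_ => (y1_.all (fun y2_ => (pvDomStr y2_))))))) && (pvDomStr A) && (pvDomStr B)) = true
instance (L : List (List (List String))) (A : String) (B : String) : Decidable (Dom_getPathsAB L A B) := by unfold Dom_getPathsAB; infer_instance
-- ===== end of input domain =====

-- B computes each sub-path by boundary indices (first leg targeting B, first leg sourced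
-- at A within that prefix) and slicing, instead of A's per-leg start/end flag accumulation;
-- where no A-source leg precedes the B-target leg, B adds nothing while A adds the empty path (see D_).

-- ===== PORT A =====
-- inner 'for leg in path' loop of A: state = (newpath, start); the 'end' flag breaks
-- immediately, so it is the branch at each step.  leg[0]/leg[2] via pyGetD (exact under Pre_).
def pvALegLoop (A B : String) (paths : PySem.Set (List (List String))) :
    List (List String) → List (List String) → Bool → PySem.Set (List (List String))
  | [], _, _ => paths
  | leg :: rest, newpath, start =>
      let start := if PySem.List.pyGetD leg 0 "" = A then true else start
      let endF := PySem.List.pyGetD leg 2 "" = B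
      let newpath := if start then newpath ++ [leg] else newpath
      if endF then PySem.Set.add paths newpath
      else pvALegLoop A B paths rest newpath start

def getPathsAB (L : List (List (List String))) (A : String) (B : String) : List (List (List String)) :=
  L.foldl (fun paths path => pvALegLoop A B paths path [] false) PySem.Set.empty

-- ===== PORT B =====
-- per-path result of B: none = no leg targeting B, or no leg sourced at A in the prefix
-- (path contributes nothing); some p = the sub-path added.
def pvBPath (A B : String) (path : List (List String)) : Option (List (List String)) :=
  match path.findIdx? (fun leg => PySem.List.pyGetD leg 2 "" = B) with
  | none => none
  | some j =>
      let pref := path.take (j + 1)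
      match pref.findIdx? (fun leg => PySem.List.pyGetD leg 0 "" = A) with
      | none => none
      | some s => some (pref.drop s)

def getPathsAB_alt (L : List (List (List String))) (A : String) (B : String) : List (List (List String)) :=
  L.foldl (fun paths path =>
    match pvBPath A B path with
    | none => paths
    | some p => PySem.Set.add paths p) PySem.Set.empty

-- ===== PRECONDITION & SPEC =====
-- Exactly the inputs where the Python A returns (no IndexError): every leg shorter than 3
-- items is only reached after an earlier (full) leg whose index-2 entry equals B has
-- already broken out of the scan of its path.
def Pre_getPathsAB (L : List (List (List String))) (A : String) (B : String) : Prop :=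
  ∀ path ∈ L, ∀ i < path.length, (path.getD i []).length < 3 →
    ∃ k < i, 3 ≤ (path.getD k []).length ∧ PySem.List.pyGetD (path.getD k []) 2 "" = B
instance (L : List (List (List String))) (A : String) (B : String) : Decidable (Pre_getPathsAB L A B) := by unfold Pre_getPathsAB; infer_instance

def pvWitness_getPathsAB : List (List (List String)) × String × String :=
  ([[["a", "r", "b"], ["b", "r", "c"]], []], "a", "c")

-- On paths whose first leg targeting B is not preceded (at or before it) by any leg sourced
-- at A, A adds the empty tuple () to its result while B adds nothing; the empty tuple is not
-- a path from A to B, so B's value is the intended one.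
def D_getPathsAB (L : List (List (List String))) (A : String) (B : String) : Prop :=
  ∃ path ∈ L,
    ((path.find? fun leg => PySem.List.pyGetD leg 0 "" == A || PySem.List.pyGetD leg 2 "" == B).any
      fun leg => PySem.List.pyGetD leg 0 "" != A) = true
instance (L : List (List (List String))) (A : String) (B : String) : Decidable (D_getPathsAB L A B) := by unfold D_getPathsAB; infer_instance

def Spec_getPathsAB (L : List (List (List String))) (A : String) (B : String) (out : List (List (List String))) : Prop := ¬ D_getPathsAB L A B → out = getPathsAB_alt L A B
instance (L : List (List (List String))) (A : String) (B : String) (out : List (List (List String))) : Decidable (Spec_getPathsAB L A B out) := by unfold Spec_getPathsAB; infer_instance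

def pvDiffWitness_getPathsAB : List (List (List String)) × String × String :=
  ([[["x", "r", "b"]]], "a", "b")
def pvDiffWitnessOut_getPathsAB : (List (List (List String))) × (List (List (List String))) :=
  ([[]], [])

-- ===== CLAIM (what is proved, stated in full; the proofs are below) =====
def Claim_unchanged_getPathsAB : Prop := ∀ (L : List (List (List String))) (A : String) (B : String), Dom_getPathsAB L A B → Pre_getPathsAB L A B → Spec_getPathsAB L A B (getPathsAB L A B)
def Claim_changed_getPathsAB : Prop := Dom_getPathsAB (pvDiffWitness_getPathsAB.1) (pvDiffWitness_getPathsAB.2.1) (pvDiffWitness_getPathsAB.2.2) ∧ Pre_getPathsAB (pvDiffWitness_getPathsAB.1) (pvDiffWitness_getPathsAB.2.1) (pvDiffWitness_getPathsAB.2.2) ∧ D_getPathsAB (pvDiffWitness_getPathsAB.1) (pvDiffWitness_getPathsAB.2.1) (pvDiffWitness_getPathsAB.2.2) ∧ getPathsAB (pvDiffWitness_getPathsAB.1) (pvDiffWitness_getPathsAB.2.1) (pvDiffWitness_getPathsAB.2.2) = pvDiffWitnessOut_getPathsAB.1 ∧ getPathsAB_alt (pvDiffWitness_getPathsAB.1)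 (pvDiffWitness_getPathsAB.2.1) (pvDiffWitness_getPathsAB.2.2) = pvDiffWitnessOut_getPathsAB.2 ∧ pvDiffWitnessOut_getPathsAB.1 ≠ pvDiffWitnessOut_getPathsAB.2
def Claim_exact_getPathsAB : Prop := ∀ (L : List (List (List String))) (A : String) (B : String), Dom_getPathsAB L A B → Pre_getPathsAB L A B → D_getPathsAB L A B → getPathsAB L A B ≠ getPathsAB_alt L A B

-- ===== LEMMAS AND PROOFS =====

-- Characterisation of A's inner loop by boundary indices, generalising the loop state.
theorem pvALegLoop_eq (A B : String) (paths : PySem.Set (List (List String))) :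
    ∀ (path acc : List (List String)) (start : Bool),
    pvALegLoop A B paths path acc start =
      match path.findIdx? (fun leg => PySem.List.pyGetD leg 2 "" = B) with
      | none => paths
      | some j =>
          PySem.Set.add paths
            (if start then acc ++ path.take (j + 1)
             else
               match (path.take (j + 1)).findIdx? (fun leg => PySem.List.pyGetD leg 0 "" = A) with
               | none => acc
               | some s => acc ++ (path.take (j + 1)).drop s) := by
  intro path
  induction path with
  | nil => intro acc start; simp [pvALegLoop]
  | cons leg rest ih =>
    intro acc start
    by_cases h2 : PySem.List.pyGetD leg 2 "" = B
    · by_cases h0 : PySem.List.pyGetD leg 0 "" = A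
      · simp [pvALegLoop, h0, h2, List.findIdx?_cons]
      · cases start <;> simp [pvALegLoop, h0, h2, List.findIdx?_cons]
    · by_cases h0 : PySem.List.pyGetD leg 0 "" = A
      · rw [pvALegLoop]
        simp only [h0, h2]
        rw [ih]
        simp [List.findIdx?_cons, h2, h0]
        cases hfi : List.findIdx? (fun leg => decide (PySem.List.pyGetD leg 2 "" = B)) rest with
        | none => simp
        | some j => simp
      · rw [pvALegLoop]
        simp only [h0, h2]
        rw [ih]
        simp [List.findIdx?_cons, h2, h0]
        cases hfi : List.findIdx? (fun leg => decide (PySem.List.pyGetD leg 2 "" = B)) rest with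
        | none => simp
        | some j =>
          simp only [Option.map_some]
          cases start with
          | true => simp
          | false =>
            simp only [Bool.false_eq_true]
            cases hf : List.findIdx? (fun leg => decide (PySem.List.pyGetD leg 0 "" = A)) rest with
            | none => simp
            | some a =>
              simp only [Option.guard]
              by_cases ha : a ≤ j
              · simp [ha, List.drop_succ_cons]
              · simp [ha]

-- "this path is an A-adds-the-empty-path path": D_ restricted to one path.
def pvBad (A B : String) (path : List (List String)) : Prop :=
  ∃ j < path.length,
    PySem.List.pyGetD (path.getD j []) 2 "" = B ∧
    (∀ k < j, PySem.List.pyGetD (path.getD k []) 2 "" ≠ B) ∧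
    (∀ k ≤ j, PySem.List.pyGetD (path.getD k []) 0 "" ≠ A)

-- pvBad holds iff the two findIdx? scans report "B-leg found, no A-leg in its prefix".
theorem pvBad_iff (A B : String) (path : List (List String)) :
    pvBad A B path ↔
      ∃ j, path.findIdx? (fun leg => PySem.List.pyGetD leg 2 "" = B) = some j ∧
        (path.take (j + 1)).findIdx? (fun leg => PySem.List.pyGetD leg 0 "" = A) = none := by
  constructor
  · rintro ⟨j, hj, hB, hfirst, hnoA⟩
    refine ⟨j, ?_, ?_⟩
    · rw [List.findIdx?_eq_some_iff_getElem]
      refine ⟨hj, by simpa [List.getD_eq_getElem?_getD, List.getElem?_eq_getElem hj] using hB, ?_⟩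
      intro k hk
      have := hfirst k hk
      simp [List.getD_eq_getElem?_getD, List.getElem?_eq_getElem (Nat.lt_trans hk hj)] at this
      simpa using this
    · rw [List.findIdx?_eq_none_iff]
      intro x hx
      rw [List.mem_take_iff_getElem] at hx
      obtain ⟨k, hk, rfl⟩ := hx
      have hkj : k ≤ j := by omega
      have := hnoA k hkj
      have hklen : k < path.length := by omega
      simp [List.getD_eq_getElem?_getD, List.getElem?_eq_getElem hklen] at this
      simpa using this
  · rintro ⟨j, hfind, hnone⟩
    rw [List.findIdx?_eq_some_iff_getElem] at hfind
    obtain ⟨hj, hB, hfirst⟩ := hfind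
    rw [List.findIdx?_eq_none_iff] at hnone
    refine ⟨j, hj, ?_, ?_, ?_⟩
    · simpa [List.getD_eq_getElem?_getD, List.getElem?_eq_getElem hj] using hB
    · intro k hk
      have := hfirst k hk
      have hklen : k < path.length := Nat.lt_trans hk hj
      simp [List.getD_eq_getElem?_getD, List.getElem?_eq_getElem hklen]
      simpa using this
    · intro k hk
      have hklen : k < path.length := by omega
      have hmem : path[k] ∈ path.take (j + 1) := by
        rw [List.mem_take_iff_getElem]
        exact ⟨k, by omega, rfl⟩
      have := hnone _ hmem
      simp [List.getD_eq_getElem?_getD, List.getElem?_eq_getElem hklen]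
      simpa using this

-- pvBad is exactly D_'s per-path condition: the first leg that is A-sourced or
-- B-targeted exists and is not A-sourced.
theorem pvBad_iff_find (A B : String) (path : List (List String)) :
    pvBad A B path ↔
      ((path.find? fun leg => PySem.List.pyGetD leg 0 "" == A || PySem.List.pyGetD leg 2 "" == B).any
        fun leg => PySem.List.pyGetD leg 0 "" != A) = true := by
  constructor
  · rintro ⟨j, hj, hB, hfirst, hnoA⟩
    have hB' : PySem.List.pyGetD path[j] 2 "" = B := by
      simpa [List.getD_eq_getElem?_getD, List.getElem?_eq_getElem hj] using hB
    have hfind : path.find?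
        (fun leg => PySem.List.pyGetD leg 0 "" == A || PySem.List.pyGetD leg 2 "" == B)
        = some path[j] := by
      rw [List.find?_eq_some_iff_getElem]
      refine ⟨by simp [hB'], j, hj, rfl, ?_⟩
      intro k hk
      have hk' : k < path.length := Nat.lt_trans hk hj
      have h2 := hfirst k hk
      have h0 := hnoA k (Nat.le_of_lt hk)
      simp [List.getD_eq_getElem?_getD, List.getElem?_eq_getElem hk'] at h2 h0
      simp [h2, h0]
    rw [hfind]
    have h0 := hnoA j (Nat.le_refl j)
    simp [List.getD_eq_getElem?_getD, List.getElem?_eq_getElem hj] at h0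
    simpa using h0
  · intro h
    cases hf : path.find?
        (fun leg => PySem.List.pyGetD leg 0 "" == A || PySem.List.pyGetD leg 2 "" == B) with
    | none => rw [hf] at h; simp at h
    | some leg =>
      rw [hf] at h
      have hA : PySem.List.pyGetD leg 0 "" ≠ A := by simpa using h
      obtain ⟨hp, i, hi, rfl, hprev⟩ := List.find?_eq_some_iff_getElem.1 hf
      have hB : PySem.List.pyGetD path[i] 2 "" = B := by
        rcases (by simpa using hp : PySem.List.pyGetD path[i] 0 "" = A ∨
            PySem.List.pyGetD path[i] 2 "" = B) with h0 | h2
        · exact absurd h0 hA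
        · exact h2
      refine ⟨i, hi, ?_, ?_, ?_⟩
      · simpa [List.getD_eq_getElem?_getD, List.getElem?_eq_getElem hi] using hB
      · intro k hk
        have hk' : k < path.length := Nat.lt_trans hk hi
        have := hprev k hk
        simp [List.getD_eq_getElem?_getD, List.getElem?_eq_getElem hk']
        simp at this
        exact this.2
      · intro k hk
        rcases Nat.lt_or_eq_of_le hk with hk | rfl
        · have hk' : k < path.length := Nat.lt_trans hk hi
          have := hprev k hk
          simp [List.getD_eq_getElem?_getD, List.getElem?_eq_getElem hk']
          simp at this
          exact this.1
        · simpa [List.getD_eq_getElem?_getD, List.getElem?_eq_getElem hi] using hA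

-- On a bad path, A's per-path step adds the empty path.
theorem pvStep_bad (A B : String) (path : List (List String)) (h : pvBad A B path)
    (paths : PySem.Set (List (List String))) :
    pvALegLoop A B paths path [] false = PySem.Set.add paths [] := by
  obtain ⟨j, hj, hs⟩ := (pvBad_iff A B path).1 h
  rw [pvALegLoop_eq]
  cases hj' : List.findIdx? (fun leg => PySem.List.pyGetD leg 2 "" = B) path with
  | none => rw [hj'] at hj; exact absurd hj (by simp)
  | some j' =>
    rw [hj'] at hj
    obtain rfl : j = j' := by simpa using hj.symm
    simp only [hs]
    simp

-- On a non-bad path, A's per-path step equals B's per-path step.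
theorem pvStep_eq (A B : String) (path : List (List String)) (h : ¬ pvBad A B path)
    (paths : PySem.Set (List (List String))) :
    pvALegLoop A B paths path [] false =
      match pvBPath A B path with
      | none => paths
      | some p => PySem.Set.add paths p := by
  rw [pvALegLoop_eq, pvBPath]
  cases hj : List.findIdx? (fun leg => PySem.List.pyGetD leg 2 "" = B) path with
  | none => rfl
  | some j =>
    simp only
    cases hs : List.findIdx? (fun leg => PySem.List.pyGetD leg 0 "" = A) (path.take (j + 1)) with
    | none => exact absurd ((pvBad_iff A B path).2 ⟨j, hj, hs⟩) h
    | some s => simp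

-- Membership in the accumulator survives A's foldl.
theorem pvA_foldl_mem (A B : String) (x : List (List String)) :
    ∀ (L : List (List (List String))) (acc : PySem.Set (List (List String))),
      x ∈ acc → x ∈ L.foldl (fun paths path => pvALegLoop A B paths path [] false) acc := by
  intro L
  induction L with
  | nil => intro acc h; simpa using h
  | cons p L ih =>
    intro acc h
    rw [List.foldl_cons]
    refine ih _ ?_
    rw [pvALegLoop_eq]
    cases List.findIdx? (fun leg => PySem.List.pyGetD leg 2 "" = B) p with
    | none => exact h
    | some j => exact (PySem.Set.mem_add _ _ _).2 (Or.inl h)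

-- If some path of L is bad, the empty path is in A's result.
theorem pvA_mem_nil (A B : String) :
    ∀ (L : List (List (List String))) (acc : PySem.Set (List (List String)))
      (path : List (List String)), path ∈ L → pvBad A B path →
      [] ∈ L.foldl (fun paths path => pvALegLoop A B paths path [] false) acc := by
  intro L
  induction L with
  | nil => intro _ _ h _; simp at h
  | cons p L ih =>
    intro acc path hmem hbad
    rw [List.foldl_cons]
    rcases List.mem_cons.1 hmem with rfl | hmem
    · apply pvA_foldl_mem
      rw [pvStep_bad A B path hbad]
      exact (PySem.Set.mem_add _ _ _).2 (Or.inr rfl)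
    · exact ih _ _ hmem hbad

-- B never adds the empty path.
theorem pvB_not_mem_nil (A B : String) :
    ∀ (L : List (List (List String))) (acc : PySem.Set (List (List String))),
      [] ∉ acc →
      [] ∉ L.foldl (fun paths path =>
        match pvBPath A B path with
        | none => paths
        | some p => PySem.Set.add paths p) acc := by
  intro L
  induction L with
  | nil => intro acc h; simpa using h
  | cons p L ih =>
    intro acc h
    rw [List.foldl_cons]
    refine ih _ ?_
    unfold pvBPath
    cases hj : List.findIdx? (fun leg => PySem.List.pyGetD leg 2 "" = B) p with
    | none => exact h
    | some j =>
      simp only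
      cases hs : List.findIdx? (fun leg => PySem.List.pyGetD leg 0 "" = A) (p.take (j + 1)) with
      | none => exact h
      | some s =>
        simp only
        intro hmem
        rcases (PySem.Set.mem_add _ _ _).1 hmem with hmem | hmem
        · exact h hmem
        · have hslen : s < (p.take (j + 1)).length :=
            by
            have := List.findIdx?_eq_some_iff_getElem.1 hs
            exact this.1
          have : ((p.take (j + 1)).drop s).length = 0 := by rw [← hmem]; rfl
          rw [List.length_drop] at this
          omega

-- ===== VERDICT (by name: the statement is the Claim_ definition above) =====
theorem getPathsAB_spec : Claim_unchanged_getPathsAB := by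
  intro L A B _ _ hnd
  unfold getPathsAB getPathsAB_alt
  apply PySem.List.foldl_congr_mem'
  intro path hmem acc
  apply pvStep_eq
  intro hbad
  exact hnd ⟨path, hmem, (pvBad_iff_find A B path).1 hbad⟩

theorem getPathsAB_changed : Claim_changed_getPathsAB := by
  unfold Claim_changed_getPathsAB; decide

theorem getPathsAB_tight : Claim_exact_getPathsAB := by
  intro L A B _ _ hd heq
  obtain ⟨path, hmem, hany⟩ := hd
  have h1 : [] ∈ getPathsAB L A B :=
    pvA_mem_nil A B L _ path hmem ((pvBad_iff_find A B path).2 hany)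
  have h2 : [] ∉ getPathsAB_alt L A B :=
    pvB_not_mem_nil A B L PySem.Set.empty (by simp [PySem.Set.empty])
  exact h2 (heq ▸ h1)
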